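-- pv_equiv track=rewrite | github.com/GSMengyueZheng/Myzheng_essay | ComplexMutation_Detection/CPXDetection_hs37d5.py | sortMutchr
-- ===== SOURCE A (Python) =====
-- def sortMutchr(mutlst):
--     dicchr = {}
--     chrlst = ["1","2","3","4","5","6",\
--               "7","8","9","10","11","12",\
--               "13","14","15","16","17",\
--               "18","19","20","21","22","X","Y"]
--     for ch in chrlst:
--         dicchr[ch] = []
--     for i in mutlst:
--         CHR = i[0].replace("chr","")
--         if CHR in dicchr:
--             dicchr[CHR].append(i)
--         else:
--             next
--     return dicchr
-- ===== SOURCE B (Python) =====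
-- def sortMutchr(mutlst):
--     chroms = [str(n) for n in range(1, 23)] + ["X", "Y"]
--     return {ch: [row for row in mutlst if row[0].replace("chr", "") == ch]
--             for ch in chroms}
-- ===== Notes on version B (the rewrite author's own statement) =====
-- stated objective: simpler
-- what changed: Replaces A's mutable-dict bucketing pass (pre-seed 24 literal keys, then append per mutation with a membership guard) by a dict comprehension over a programmatically generated chromosome list (str of range(1,23) plus X,Y) that filters the mutation list once per chromosome.
import Mathlib
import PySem

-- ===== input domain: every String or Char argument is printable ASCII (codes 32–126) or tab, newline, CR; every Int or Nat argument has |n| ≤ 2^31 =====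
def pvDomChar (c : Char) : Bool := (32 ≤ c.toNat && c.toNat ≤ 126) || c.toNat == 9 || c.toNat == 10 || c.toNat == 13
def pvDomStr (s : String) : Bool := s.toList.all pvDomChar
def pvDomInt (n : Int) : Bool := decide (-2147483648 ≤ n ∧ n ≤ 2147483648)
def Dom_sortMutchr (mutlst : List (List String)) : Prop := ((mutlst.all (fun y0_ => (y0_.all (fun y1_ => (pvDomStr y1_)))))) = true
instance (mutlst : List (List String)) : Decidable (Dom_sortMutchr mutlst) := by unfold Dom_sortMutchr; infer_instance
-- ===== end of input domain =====

-- B replaces A's mutable-dict bucketing pass by one filter of the mutation list per chromosome,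
-- over a programmatically generated chromosome list: simpler, same return value.

-- ===== PORT A =====
def sortMutchr (mutlst : List (List String)) : List (String × List (List String)) :=
  let chrlst : List String := ["1","2","3","4","5","6",
              "7","8","9","10","11","12",
              "13","14","15","16","17",
              "18","19","20","21","22","X","Y"]
  let dicchr : PySem.Dict String (List (List String)) :=
    chrlst.foldl (fun d ch => d.insert ch []) PySem.Dict.empty
  let dicchr := mutlst.foldl
    (fun d i =>
      let CHR := PySem.Str.replace (PySem.List.pyGetD i 0 "") "chr" ""
      if d.contains CHR then d.modify CHR [] (fun v => v ++ [i]) else d)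
    dicchr
  dicchr.items

-- ===== PORT B =====
def sortMutchr_alt (mutlst : List (List String)) : List (String × List (List String)) :=
  let chroms : List String := ((PySem.List.pyRange 1 23 1).map PySem.Int.toStr) ++ ["X", "Y"]
  chroms.map (fun ch =>
    (ch, mutlst.filter (fun row => PySem.Str.replace (PySem.List.pyGetD row 0 "") "chr" "" == ch)))

-- ===== PRECONDITION & SPEC =====
-- Pre_ excludes mutation rows that are empty lists, on which Python A raises IndexError at i[0].
def Pre_sortMutchr (mutlst : List (List String)) : Prop := ∀ i ∈ mutlst, i ≠ []
instance (mutlst : List (List String)) : Decidable (Pre_sortMutchr mutlst) := by unfold Pre_sortMutchr; infer_instance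
def pvWitness_sortMutchr : List (List String) := [["chr1", "100", "A"], ["X", "5"], ["chr23"]]
def Spec_sortMutchr (mutlst : List (List String)) (out : List (String × List (List String))) : Prop := out = sortMutchr_alt mutlst
instance (mutlst : List (List String)) (out : List (String × List (List String))) : Decidable (Spec_sortMutchr mutlst out) := by unfold Spec_sortMutchr; infer_instance

-- ===== CLAIM (what is proved, stated in full; the proofs are below) =====
def Claim_equal_sortMutchr : Prop := ∀ (mutlst : List (List String)), Dom_sortMutchr mutlst → Pre_sortMutchr mutlst → Spec_sortMutchr mutlst (sortMutchr mutlst)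

-- ===== LEMMAS AND PROOFS =====

-- the chromosome key A and B both compute for a row
def pvKey (i : List String) : String := PySem.Str.replace (PySem.List.pyGetD i 0 "") "chr" ""

-- A's bucketing step for one row
def pvStep (d : PySem.Dict String (List (List String))) (i : List String) :
    PySem.Dict String (List (List String)) :=
  if d.contains (pvKey i) then d.modify (pvKey i) [] (fun v => v ++ [i]) else d

lemma pvFind_beq_self (l : List String) (k : String) (hk : k ∈ l) :
    l.find? (fun ch => ch == k) = some k := by
  induction l with
  | nil => cases hk
  | cons a l ih =>
    by_cases h : a = k
    · simp [List.find?, h]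
    · have hb : (a == k) = false := by simp [h]
      rcases List.mem_cons.mp hk with h' | h'
      · exact absurd h'.symm h
      · simp [List.find?, hb, ih h']

lemma pvContains_mkmap (l : List String) (g : String → List (List String)) (k : String) :
    (PySem.Dict.mk (l.map fun ch => (ch, g ch))).contains k = l.any (fun ch => ch == k) := by
  simp [PySem.Dict.contains, List.any_map, Function.comp_def]

lemma pvGetD_mkmap (l : List String) (g : String → List (List String)) (k : String)
    (hk : k ∈ l) :
    (PySem.Dict.mk (l.map fun ch => (ch, g ch))).getD k [] = g k := by
  simp [PySem.Dict.getD, PySem.Dict.get?, List.find?_map, Function.comp_def, pvFind_beq_self l k hk]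

lemma pvStep_mem (l : List String) (g : String → List (List String)) (i : List String)
    (hk : pvKey i ∈ l) :
    pvStep (PySem.Dict.mk (l.map fun ch => (ch, g ch))) i
      = PySem.Dict.mk (l.map fun ch => (ch, if ch = pvKey i then g ch ++ [i] else g ch)) := by
  have hc : (PySem.Dict.mk (l.map fun ch => (ch, g ch))).contains (pvKey i) = true := by
    rw [pvContains_mkmap]; simp only [List.any_eq_true]; exact ⟨pvKey i, hk, by simp⟩
  unfold pvStep
  rw [if_pos hc]
  unfold PySem.Dict.modify PySem.Dict.insert
  rw [if_pos hc, pvGetD_mkmap l g _ hk]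
  congr 1
  simp only [List.map_map]
  apply List.map_congr_left
  intro ch _
  by_cases h : ch = pvKey i
  · simp [Function.comp, h]
  · simp [Function.comp, h, beq_iff_eq]

lemma pvStep_not_mem (l : List String) (g : String → List (List String)) (i : List String)
    (hk : pvKey i ∉ l) :
    pvStep (PySem.Dict.mk (l.map fun ch => (ch, g ch))) i
      = PySem.Dict.mk (l.map fun ch => (ch, g ch)) := by
  have hc : (PySem.Dict.mk (l.map fun ch => (ch, g ch))).contains (pvKey i) = false := by
    rw [pvContains_mkmap]
    simp only [List.any_eq_false]
    intro ch hch
    simp only [beq_iff_eq]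
    intro h; exact hk (h ▸ hch)
  unfold pvStep
  rw [if_neg (by simp [hc])]

lemma pvLoop (mutlst : List (List String)) (l : List String)
    (g : String → List (List String)) :
    (mutlst.foldl pvStep (PySem.Dict.mk (l.map fun ch => (ch, g ch)))).items
      = l.map (fun ch => (ch, g ch ++ mutlst.filter (fun i => pvKey i == ch))) := by
  induction mutlst generalizing g with
  | nil => simp
  | cons i rest ih =>
    by_cases hk : pvKey i ∈ l
    · rw [List.foldl_cons, pvStep_mem l g i hk,
        ih (fun ch => if ch = pvKey i then g ch ++ [i] else g ch)]
      apply List.map_congr_left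
      intro ch _
      by_cases h : ch = pvKey i
      · simp [h]
      · have : (pvKey i == ch) = false := by simp only [beq_eq_false_iff_ne, ne_eq]; exact fun e => h e.symm
        simp [h, this]
    · rw [List.foldl_cons, pvStep_not_mem l g i hk, ih g]
      apply List.map_congr_left
      intro ch hch
      have : (pvKey i == ch) = false := by
        simp only [beq_eq_false_iff_ne, ne_eq]
        intro h; exact hk (h ▸ hch)
      simp [this]

-- the seeded dict is the literal 24-key association list
lemma pvInit :
    (["1","2","3","4","5","6","7","8","9","10","11","12","13","14","15","16","17",
      "18","19","20","21","22","X","Y"] : List String).foldl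
      (fun d ch => d.insert ch ([] : List (List String))) PySem.Dict.empty
    = PySem.Dict.mk ((["1","2","3","4","5","6","7","8","9","10","11","12","13","14","15",
        "16","17","18","19","20","21","22","X","Y"] : List String).map
        fun ch => (ch, ([] : List (List String)))) := by
  decide

-- B's generated chromosome list is the literal 24-entry list
lemma pvChroms :
    (((PySem.List.pyRange 1 23 1).map PySem.Int.toStr) ++ ["X", "Y"])
      = (["1","2","3","4","5","6","7","8","9","10","11","12","13","14","15","16","17",
          "18","19","20","21","22","X","Y"] : List String) := by
  decide

-- ===== VERDICT (by name: the statement is the Claim_ definition above) =====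
theorem sortMutchr_spec : Claim_equal_sortMutchr := by
  intro mutlst _ _
  show sortMutchr mutlst = sortMutchr_alt mutlst
  unfold sortMutchr sortMutchr_alt
  simp only [pvChroms]
  rw [pvInit]
  have := pvLoop mutlst
    ["1","2","3","4","5","6","7","8","9","10","11","12","13","14","15","16","17",
     "18","19","20","21","22","X","Y"] (fun _ => [])
  simp only [List.nil_append] at this
  exact this
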